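-- pv_equiv track=rewrite | github.com/justadev8/553 | increment_2.py | isEventCausal_VectorClock
-- ===== SOURCE A (Python) =====
-- def isEventCausal_VectorClock(array1, array2):
--     #define a variable for some index which has to be lower
--     lower_index = -1
--
--     for i in range(len(array1)):
--
--         #check if the
--         if array1[i] < array2[i]:
--             lower_index = i
--         elif array2[i] < array1[i]:
--             return False
--
--     if lower_index != -1 :
--         return True
--     else:
--         return False
-- ===== SOURCE B (Python) =====
-- def isEventCausal_VectorClock(array1, array2):
--     dominated = all(array1[i] <= array2[i] for i in range(len(array1)))
--     return dominated and any(array1[i] < array2[i] for i in range(len(array1)))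
-- ===== Notes on version B (the rewrite author's own statement) =====
-- stated objective: simpler
-- what changed: Replaces the stateful index-tracking loop (lower_index sentinel plus early returns) by the conjunction of two aggregate scans: all(a1[i] <= a2[i]) and any(a1[i] < a2[i]).
import Mathlib
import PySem

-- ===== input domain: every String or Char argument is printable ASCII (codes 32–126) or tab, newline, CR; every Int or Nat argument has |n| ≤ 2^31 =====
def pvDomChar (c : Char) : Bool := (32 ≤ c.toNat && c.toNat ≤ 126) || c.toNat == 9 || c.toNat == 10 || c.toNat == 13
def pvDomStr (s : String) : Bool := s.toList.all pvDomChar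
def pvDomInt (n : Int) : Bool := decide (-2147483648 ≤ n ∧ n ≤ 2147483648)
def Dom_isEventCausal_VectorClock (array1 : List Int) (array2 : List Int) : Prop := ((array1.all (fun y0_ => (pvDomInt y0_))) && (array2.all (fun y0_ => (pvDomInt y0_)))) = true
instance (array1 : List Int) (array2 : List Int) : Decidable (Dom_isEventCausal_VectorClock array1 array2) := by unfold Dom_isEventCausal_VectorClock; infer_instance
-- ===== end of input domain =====

-- B replaces A's stateful lower_index loop by two aggregate scans (all ≤, any <); same O(n) cost.
-- Both programs raise IndexError on the same inputs (array2 shorter with no earlier strict excess); Pre_ excludes exactly those.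

-- ===== PORT A =====
-- loop over i in range(len(array1)) carrying lower_index; array2[i] read with getD 0
-- (out-of-range, an IndexError in Python, is excluded by Pre_).
def isEventCausal_VectorClock_loopA (array1 : List Int) (array2 : List Int) (i : Nat) (lowerIndex : Int) : Bool :=
  if i < array1.length then
    if array1.getD i 0 < array2.getD i 0 then
      isEventCausal_VectorClock_loopA array1 array2 (i + 1) (Int.ofNat i)
    else if array2.getD i 0 < array1.getD i 0 then
      false
    else
      isEventCausal_VectorClock_loopA array1 array2 (i + 1) lowerIndex
  else
    lowerIndex != -1
termination_by array1.length - i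

def isEventCausal_VectorClock (array1 : List Int) (array2 : List Int) : Bool :=
  isEventCausal_VectorClock_loopA array1 array2 0 (-1)

-- ===== PORT B =====
-- dominated = all(array1[i] <= array2[i]); strict = any(array1[i] < array2[i]); dominated and strict.
def isEventCausal_VectorClock_alt (array1 : List Int) (array2 : List Int) : Bool :=
  ((List.range array1.length).all (fun i => decide (array1.getD i 0 ≤ array2.getD i 0)))
    && ((List.range array1.length).any (fun i => decide (array1.getD i 0 < array2.getD i 0)))

-- ===== PRECONDITION & SPEC =====
-- Pre_ excludes exactly the inputs where A (and B alike) raises IndexError: array2 shorter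
-- than array1 with no strict excess array2[i] < array1[i] inside array2's range.
def Pre_isEventCausal_VectorClock (array1 : List Int) (array2 : List Int) : Prop :=
  array1.length ≤ array2.length ∨ ∃ i < array2.length, array2.getD i 0 < array1.getD i 0
instance (array1 : List Int) (array2 : List Int) : Decidable (Pre_isEventCausal_VectorClock array1 array2) := by unfold Pre_isEventCausal_VectorClock; infer_instance
def pvWitness_isEventCausal_VectorClock : List Int × List Int := ([1, 2], [1, 3])

def Spec_isEventCausal_VectorClock (array1 : List Int) (array2 : List Int) (out : Bool) : Prop := out = isEventCausal_VectorClock_alt array1 array2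
instance (array1 : List Int) (array2 : List Int) (out : Bool) : Decidable (Spec_isEventCausal_VectorClock array1 array2 out) := by unfold Spec_isEventCausal_VectorClock; infer_instance

-- ===== CLAIM (what is proved, stated in full; the proofs are below) =====
def Claim_equal_isEventCausal_VectorClock : Prop := ∀ (array1 : List Int) (array2 : List Int), Dom_isEventCausal_VectorClock array1 array2 → Pre_isEventCausal_VectorClock array1 array2 → Spec_isEventCausal_VectorClock array1 array2 (isEventCausal_VectorClock array1 array2)

-- ===== LEMMAS AND PROOFS =====

-- Loop characterisation: from index i with accumulator li, A's loop equals
-- "remaining suffix all ≤" && (li ≠ -1 already, or some strict < in the suffix).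
theorem loopA_eq (array1 array2 : List Int) :
    ∀ i li, isEventCausal_VectorClock_loopA array1 array2 i li =
      (((List.range' i (array1.length - i)).all (fun j => decide (array1.getD j 0 ≤ array2.getD j 0)))
        && ((li != -1) || (List.range' i (array1.length - i)).any (fun j => decide (array1.getD j 0 < array2.getD j 0)))) := by
  intro i li
  induction h : array1.length - i generalizing i li with
  | zero =>
    unfold isEventCausal_VectorClock_loopA
    have : ¬ i < array1.length := by omega
    simp [this]
  | succ n ih =>
    have hi : i < array1.length := by omega
    have hn : array1.length - (i + 1) = n := by omega
    unfold isEventCausal_VectorClock_loopA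
    rw [List.range'_succ, if_pos hi]
    simp only [List.all_cons, List.any_cons]
    by_cases h1 : array1.getD i 0 < array2.getD i 0
    · rw [if_pos h1, ih (i + 1) (Int.ofNat i) hn]
      have hle : decide (array1.getD i 0 ≤ array2.getD i 0) = true := decide_eq_true (le_of_lt h1)
      have hlt : decide (array1.getD i 0 < array2.getD i 0) = true := decide_eq_true h1
      have hne : ((Int.ofNat i) != -1) = true := by
        simp only [bne_iff_ne, ne_eq, Int.ofNat_eq_natCast]; omega
      rw [hle, hlt, hne]
      simp
    · rw [if_neg h1]
      by_cases h2 : array2.getD i 0 < array1.getD i 0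
      · rw [if_pos h2]
        have hle : decide (array1.getD i 0 ≤ array2.getD i 0) = false := by
          simp only [decide_eq_false_iff_not, not_le]; exact h2
        rw [hle]
        simp
      · rw [if_neg h2, ih (i + 1) li hn]
        have hle : decide (array1.getD i 0 ≤ array2.getD i 0) = true := decide_eq_true (le_of_not_gt h2)
        have hlt : decide (array1.getD i 0 < array2.getD i 0) = false := decide_eq_false h1
        rw [hle, hlt]
        simp

-- ===== VERDICT (by name: the statement is the Claim_ definition above) =====
theorem isEventCausal_VectorClock_spec : Claim_equal_isEventCausal_VectorClock := by
  intro array1 array2 _ _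
  unfold Spec_isEventCausal_VectorClock isEventCausal_VectorClock isEventCausal_VectorClock_alt
  rw [loopA_eq]
  simp [List.range_eq_range']
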